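-- pv_equiv track=rewrite | github.com/HongMinYeong/Algorithm | 프로그래머스/1/42840. 모의고사/모의고사.py | solution
-- ===== SOURCE A (Python) =====
-- def solution(answers):
--     answer = []
--     one = [1,2,3,4,5]
--     o_score = 0
--     t_score = 0
--     th_score = 0
--     two = [2,1,2,3,2,4,2,5]
--     three = [3,3,1,1,2,2,4,4,5,5]
--     for i in range(len(answers)):
--         if one[i % len(one)] == answers[i]:
--             o_score +=1
--         if two[i % len(two)] == answers[i]:
--             t_score +=1
--         if three[i % len(three)] == answers[i]:
--             th_score +=1
--     if max(o_score,t_score,th_score) == o_score: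
--         answer.append(1)
--     if max(o_score,t_score,th_score) == t_score:
--         answer.append(2)
--     if max(o_score,t_score,th_score) == th_score:
--         answer.append(3)
--
--
--     return answer
-- ===== SOURCE B (Python) =====
-- def solution(answers):
--     pats = [[1, 2, 3, 4, 5],
--             [2, 1, 2, 3, 2, 4, 2, 5],
--             [3, 3, 1, 1, 2, 2, 4, 4, 5, 5]]
--     # All three patterns repeat with period dividing 40, so a position's pattern
--     # values depend only on i % 40.  One pass builds a histogram keyed by
--     # (i % 40, answer); each score is then read off the histogram with 40 lookups,
--     # no per-element comparison against any pattern.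
--     hist = {}
--     for i, a in enumerate(answers):
--         key = (i % 40, a)
--         hist[key] = hist.get(key, 0) + 1
--     scores = [sum(hist.get((r, p[r % len(p)]), 0) for r in range(40)) for p in pats]
--     best = max(scores)
--     return [k + 1 for k, s in enumerate(scores) if s == best]
-- ===== Notes on version B (the rewrite author's own statement) =====
-- stated objective: alternative
-- what changed: A compares every answer against all three cyclic patterns in one loop with three counters; B never compares answers to patterns element-wise: it builds a histogram keyed by (position mod 40, answer) in one pass (40 = lcm of the pattern periods) and reads each pattern's score off the histogram with 40 fixed lookups, then selects winners by a uniform max-then-filter scan.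
import Mathlib
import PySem

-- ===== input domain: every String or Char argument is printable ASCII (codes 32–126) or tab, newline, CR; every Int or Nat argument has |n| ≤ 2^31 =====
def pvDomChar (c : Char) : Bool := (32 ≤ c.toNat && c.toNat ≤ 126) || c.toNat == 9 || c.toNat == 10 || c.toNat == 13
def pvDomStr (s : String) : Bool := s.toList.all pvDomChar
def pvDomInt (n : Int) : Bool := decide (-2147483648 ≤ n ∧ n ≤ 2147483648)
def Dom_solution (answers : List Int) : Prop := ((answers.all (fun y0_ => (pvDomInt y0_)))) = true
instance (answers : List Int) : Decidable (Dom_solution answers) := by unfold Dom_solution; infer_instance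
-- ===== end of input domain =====

-- B drops A's element-by-element pattern comparison: it builds one histogram keyed
-- by (position mod 40, answer) and reads each pattern's score off it with 40
-- lookups (objective: alternative algorithm, same O(n) cost).

-- ===== PORT A =====
-- the for-i-in-range loop of A, carrying the three counters; answers[i] with
-- 0 ≤ i < len(answers) and one[i % 5] etc. are exact as Nat-indexed getD
def solLoopA (answers one two three : List Int) (i : Nat) (o t th : Int) :
    Int × Int × Int :=
  if h : i < answers.length then
    solLoopA answers one two three (i + 1)
      (if one.getD (i % one.length) 0 = answers[i] then o + 1 else o)
      (if two.getD (i % two.length) 0 = answers[i] then t + 1 else t)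
      (if three.getD (i % three.length) 0 = answers[i] then th + 1 else th)
  else (o, t, th)
  termination_by answers.length - i

def solution (answers : List Int) : List Int :=
  let one : List Int := [1, 2, 3, 4, 5]
  let two : List Int := [2, 1, 2, 3, 2, 4, 2, 5]
  let three : List Int := [3, 3, 1, 1, 2, 2, 4, 4, 5, 5]
  let r := solLoopA answers one two three 0 0 0 0
  let o_score := r.1
  let t_score := r.2.1
  let th_score := r.2.2
  -- max(a, b, c) = max a (max b c); the three appends become three concats
  let m := max o_score (max t_score th_score)
  (if m = o_score then [1] else []) ++
  (if m = t_score then [2] else []) ++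
  (if m = th_score then [3] else [])

-- ===== PORT B =====
-- the histogram loop: hist[(i % 40, a)] = hist.get((i % 40, a), 0) + 1
def histB (answers : List Int) : PySem.Dict (Int × Int) Int :=
  (PySem.List.enumerate answers 0).foldl
    (fun d q =>
      let key : Int × Int := (PySem.Int.mod q.1 40, q.2)
      d.insert key (d.getD key 0 + 1)) PySem.Dict.empty

-- sum(hist.get((r, p[r % len(p)]), 0) for r in range(40))
def scoreB (hist : PySem.Dict (Int × Int) Int) (p : List Int) : Int :=
  ((PySem.List.pyRange 0 40 1).map
    (fun r => hist.getD (r, PySem.List.pyGetD p (PySem.Int.mod r p.length) 0) 0)).sum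

def solution_alt (answers : List Int) : List Int :=
  let pats : List (List Int) :=
    [[1, 2, 3, 4, 5], [2, 1, 2, 3, 2, 4, 2, 5], [3, 3, 1, 1, 2, 2, 4, 4, 5, 5]]
  let hist := histB answers
  let scores := pats.map (scoreB hist)
  let best := (PySem.List.max? scores (fun y => y)).getD 0
  (PySem.List.enumerate scores 0).filterMap
    (fun q => if q.2 = best then some (q.1 + 1) else none)

-- ===== PRECONDITION & SPEC =====
def Spec_solution (answers : List Int) (out : List Int) : Prop := out = solution_alt answers
instance (answers : List Int) (out : List Int) : Decidable (Spec_solution answers out) := by unfold Spec_solution; infer_instance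

-- ===== CLAIM (what is proved, stated in full; the proofs are below) =====
def Claim_equal_solution : Prop := ∀ (answers : List Int), Dom_solution answers → Spec_solution answers (solution answers)

-- ===== LEMMAS AND PROOFS =====

-- reference count: matches of pattern p against l, positions starting at i
def cnt (p : List Int) (i : Nat) (l : List Int) : Int :=
  match l with
  | [] => 0
  | a :: r => (if p.getD (i % p.length) 0 = a then (1 : Int) else 0) + cnt p (i + 1) r

theorem solLoopA_eq (answers one two three : List Int) (i : Nat) (o t th : Int) :
    solLoopA answers one two three i o t th =
      (o + cnt one i (answers.drop i), t + cnt two i (answers.drop i),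
       th + cnt three i (answers.drop i)) := by
  rw [solLoopA]
  by_cases h : i < answers.length
  · have hd : answers.drop i = answers[i] :: answers.drop (i + 1) :=
      List.drop_eq_getElem_cons h
    rw [dif_pos h, solLoopA_eq, hd]
    simp only [cnt]
    refine Prod.ext ?_ (Prod.ext ?_ ?_) <;> simp <;> split_ifs <;> ring
  · rw [dif_neg h, List.drop_eq_nil_of_le (by omega)]
    simp [cnt]
  termination_by answers.length - i

-- the key function of B's histogram pass
def keyf (q : Int × Int) : Int × Int := (PySem.Int.mod q.1 40, q.2)

theorem histB_eq_counter (answers : List Int) :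
    histB answers = PySem.Dict.counter ((PySem.List.enumerate answers 0).map keyf) := by
  rw [← PySem.Dict.foldl_insert_getD_add_one_eq_counter, List.foldl_map]
  rfl

-- sum of a point indicator over range n
theorem sum_indicator (n c : Nat) (g : Nat → Int) (a : Int) :
    ((List.range n).map
      (fun r : Nat => if (((c : Int), a) : Int × Int) = ((r : Int), g r) then (1 : Int) else 0)).sum =
      if c < n ∧ g c = a then 1 else 0 := by
  induction n with
  | zero => simp
  | succ m ih =>
    rw [List.range_succ, List.map_append, List.sum_append, ih]
    simp only [List.map_cons, List.map_nil, List.sum_cons, List.sum_nil, Prod.mk.injEq]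
    by_cases hc : c = m
    · subst hc
      by_cases hg : g c = a
      · simp [hg]
      · have hne : ¬ a = g c := fun hh => hg hh.symm
        simp [hg, hne]
    · have hne : ((c : Int)) ≠ (m : Int) := by exact_mod_cast hc
      rcases Nat.lt_or_ge c m with h | h
      · have h' : c < m + 1 := Nat.lt_succ_of_lt h
        simp [h, h', hne]
      · have h1 : ¬ c < m := by omega
        have h2 : ¬ c < m + 1 := by omega
        simp [h1, h2, hne]

theorem sum_map_add (l : List Nat) (f g : Nat → Int) :
    (l.map (fun r => f r + g r)).sum = (l.map f).sum + (l.map g).sum := by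
  induction l with
  | nil => simp
  | cons x t ih => simp [ih]; ring

-- main lemma: reading the histogram's 40 residue entries for pattern p counts
-- exactly p's matches, because p's period divides 40
theorem sum_count_eq_cnt (p : List Int) (hdvd : p.length ∣ 40)
    (l : List Int) (s : Nat) :
    ((List.range 40).map
      (fun r : Nat => ((((PySem.List.enumerate l (s : Int)).map keyf).count
          ((r : Int), p.getD (r % p.length) 0) : Nat) : Int))).sum = cnt p s l := by
  induction l generalizing s with
  | nil => simp [cnt, PySem.List.enumerate_nil]
  | cons a t ih =>
    have hmod : PySem.Int.mod (s : Int) 40 = ((s % 40 : Nat) : Int) := by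
      have := PySem.Int.mod_natCast s 40; exact_mod_cast this
    have hcast : ((s : Int) + 1) = ((s + 1 : Nat) : Int) := by push_cast; ring
    rw [PySem.List.enumerate_cons]
    simp only [List.map_cons, keyf, hmod, hcast]
    have hcnt : ∀ r : Nat,
        (((((s % 40 : Nat) : Int), a) :: (PySem.List.enumerate t ((s + 1 : Nat) : Int)).map keyf).count
          ((r : Int), p.getD (r % p.length) 0) : Int) =
        (((PySem.List.enumerate t ((s + 1 : Nat) : Int)).map keyf).count
          ((r : Int), p.getD (r % p.length) 0) : Int) +
        (if ((((s % 40 : Nat) : Int), a) : Int × Int) = ((r : Int), p.getD (r % p.length) 0)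
         then (1 : Int) else 0) := by
      intro r
      rw [List.count_cons, Nat.cast_add, Nat.cast_ite, Nat.cast_one, Nat.cast_zero]
      simp only [beq_iff_eq]
    calc ((List.range 40).map fun r : Nat =>
            ((((((s % 40 : Nat) : Int), a) :: (PySem.List.enumerate t ((s + 1 : Nat) : Int)).map keyf).count
              ((r : Int), p.getD (r % p.length) 0) : Nat) : Int)).sum
        = ((List.range 40).map fun r : Nat =>
            (((PySem.List.enumerate t ((s + 1 : Nat) : Int)).map keyf).count
              ((r : Int), p.getD (r % p.length) 0) : Int) +
            (if ((((s % 40 : Nat) : Int), a) : Int × Int) = ((r : Int), p.getD (r % p.length) 0)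
             then (1 : Int) else 0)).sum := by
          exact congrArg List.sum (List.map_congr_left (fun r _ => hcnt r))
      _ = cnt p (s + 1) t +
            (if p.getD ((s % 40) % p.length) 0 = a then 1 else 0) := by
          rw [sum_map_add, ih (s + 1),
            sum_indicator 40 (s % 40) (fun r => p.getD (r % p.length) 0) a]
          have h40 : s % 40 < 40 := Nat.mod_lt _ (by omega)
          by_cases hg : p.getD ((s % 40) % p.length) 0 = a <;> simp [h40]
      _ = cnt p (s + 1) t + (if p.getD (s % p.length) 0 = a then 1 else 0) := by
          rw [Nat.mod_mod_of_dvd s hdvd]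
      _ = cnt p s (a :: t) := by rw [cnt]; ring

theorem scoreB_eq (answers : List Int) (p : List Int) (hp : p ≠ []) (hdvd : p.length ∣ 40) :
    scoreB (histB answers) p = cnt p 0 answers := by
  have hr : PySem.List.pyRange 0 40 1 = (List.range 40).map (fun k => (k : Int)) := by
    decide
  rw [scoreB, histB_eq_counter, hr, List.map_map]
  have hlen : (0 : Int) < p.length := by
    have := List.length_pos_iff.mpr hp; exact_mod_cast this
  have hfun : ∀ r : Nat,
      (PySem.Dict.counter ((PySem.List.enumerate answers 0).map keyf)).getD
        ((r : Int), PySem.List.pyGetD p (PySem.Int.mod (r : Int) p.length) 0) 0 =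
      ((((PySem.List.enumerate answers 0).map keyf).count
          ((r : Int), p.getD (r % p.length) 0) : Nat) : Int) := by
    intro r
    rw [PySem.Int.mod_natCast, PySem.List.pyGetD_natCast, PySem.Dict.getD_counter]
  calc ((List.range 40).map
          ((fun r => (PySem.Dict.counter ((PySem.List.enumerate answers 0).map keyf)).getD
            (r, PySem.List.pyGetD p (PySem.Int.mod r p.length) 0) 0) ∘ (fun k : Nat => (k : Int)))).sum
      = ((List.range 40).map (fun r : Nat =>
          ((((PySem.List.enumerate answers 0).map keyf).count
            ((r : Int), p.getD (r % p.length) 0) : Nat) : Int))).sum := by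
        exact congrArg List.sum (List.map_congr_left (fun r _ => hfun r))
    _ = cnt p 0 answers := by
        have := sum_count_eq_cnt p hdvd answers 0
        simpa using this

-- the winner-selection step: A's three conditional appends agree with B's
-- max?-then-filterMap scan over the literal three-element score list
theorem winners_eq (c1 c2 c3 : Int) :
    (if max c1 (max c2 c3) = c1 then ([1] : List Int) else []) ++
    (if max c1 (max c2 c3) = c2 then [2] else []) ++
    (if max c1 (max c2 c3) = c3 then [3] else []) =
    (PySem.List.enumerate [c1, c2, c3] 0).filterMap
      (fun q => if q.2 = (PySem.List.max? [c1, c2, c3] (fun y => y)).getD 0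
                then some (q.1 + 1) else none) := by
  have hb : (PySem.List.max? [c1, c2, c3] (fun y => y)).getD 0 = max c1 (max c2 c3) := by
    rw [PySem.List.max?_id_cons]
    simp [max_assoc]
  simp only [hb, PySem.List.enumerate_cons, PySem.List.enumerate_nil,
    List.filterMap_cons, List.filterMap_nil]
  split_ifs <;> first | (exfalso; omega) | simp

theorem solution_eq_alt (answers : List Int) :
    solution answers = solution_alt answers := by
  simp only [solution, solution_alt]
  rw [solLoopA_eq]
  simp only [List.drop_zero, List.map_cons, List.map_nil,
    scoreB_eq answers [1, 2, 3, 4, 5] (by simp) (by norm_num),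
    scoreB_eq answers [2, 1, 2, 3, 2, 4, 2, 5] (by simp) (by norm_num),
    scoreB_eq answers [3, 3, 1, 1, 2, 2, 4, 4, 5, 5] (by simp) (by norm_num),
    zero_add]
  exact winners_eq _ _ _

-- ===== VERDICT (by name: the statement is the Claim_ definition above) =====
theorem solution_spec : Claim_equal_solution := by
  intro answers _
  unfold Spec_solution
  exact solution_eq_alt answers
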